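-- pv_equiv track=rewrite | github.com/dj-lumiere/problem-solving-boj | 백준/Silver/29702. 이상한 호텔의 송이/이상한 호텔의 송이.py | find_minimal_path
-- ===== SOURCE A (Python) =====
-- def find_minimal_path(target: int):
--     current_floor = target.bit_length()
--     current_room = target
--     path = []
--     while current_floor > 0:
--         room_order_in_current_floor = current_room - (1 << (current_floor - 1)) + 1
--         path.append(f"{current_floor}{room_order_in_current_floor:0>18}")
--         current_floor -= 1
--         current_room >>= 1
--     return path
-- ===== SOURCE B (Python) =====
-- def find_minimal_path(target: int):
--     if target == 0:
--         return []
--     bits = bin(target).removeprefix('0b')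
--     return [f"{f}{int(bits[1:f] or '0', 2) + 1:0>18}"
--             for f in range(len(bits), 0, -1)]
-- ===== Notes on version B (the rewrite author's own statement) =====
-- stated objective: alternative
-- what changed: Instead of a mutable while loop shifting the room number bit by bit, B computes the binary string of target once (bin) and derives each floor's room order by parsing the length-f prefix of that string (with the leading bit dropped) back with int(.,2); no shifts or running state.
-- outside the precondition, e.g. on find_minimal_path(-1): A returns ['10000000000000000-1'], B raises ValueError
import Mathlib
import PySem

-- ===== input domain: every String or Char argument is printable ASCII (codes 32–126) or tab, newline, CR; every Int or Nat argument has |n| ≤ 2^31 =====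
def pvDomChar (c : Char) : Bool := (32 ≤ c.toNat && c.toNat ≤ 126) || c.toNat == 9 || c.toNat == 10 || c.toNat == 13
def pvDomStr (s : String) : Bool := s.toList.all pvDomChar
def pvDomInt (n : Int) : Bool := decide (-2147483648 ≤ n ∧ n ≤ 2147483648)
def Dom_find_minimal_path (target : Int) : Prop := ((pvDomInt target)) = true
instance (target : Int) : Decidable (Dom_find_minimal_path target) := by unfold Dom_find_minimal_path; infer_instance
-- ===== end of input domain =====

-- B replaces A's mutable shift-and-append while loop by parsing prefixes of the binary string bin(target); objective: alternative algorithm.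

-- f"{x:0>18}": str(x) left-padded with '0' to width 18 (both Pythons use the same format spec)
def pvPad18 (x : Int) : String :=
  String.mk (List.replicate (18 - (PySem.Int.toChars x).length) '0' ++ PySem.Int.toChars x)

-- ===== PORT A =====
def pvLoopA (floor room : Int) (path : List String) : List String :=
  if 0 < floor then
    pvLoopA (floor - 1) (PySem.Int.floordiv room 2)
      (path ++ [PySem.Int.toStr floor ++ pvPad18 (room - 2 ^ (floor - 1).toNat + 1)])
  else path
termination_by floor.toNat
decreasing_by omega

def find_minimal_path (target : Int) : List String :=
  pvLoopA ((PySem.Int.bitLength target : Nat) : Int) target []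

-- ===== PORT B =====
-- hand port of the digit part of Python bin(n) for n : Nat (MSB first; [] for 0)
def pvBinChars (n : Nat) : List Char :=
  if h : n = 0 then [] else pvBinChars (n / 2) ++ [if n % 2 = 1 then '1' else '0']
termination_by n
decreasing_by exact Nat.div_lt_self (Nat.pos_of_ne_zero h) (by omega)

-- hand port of Python bin(): exact ("-0b…" for negatives, "0b0" for 0)
def pvBin (n : Int) : List Char :=
  (if n < 0 then ['-', '0', 'b'] else ['0', 'b']) ++
    (if n = 0 then ['0'] else pvBinChars n.natAbs)

-- hand port of int(s, 2) on strings of binary digits (exact there; its error cases are unreachable inside Pre_)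
-- hand port of str.removeprefix('0b') on a char list (exact)
def pvRemovePrefix0b (cs : List Char) : List Char :=
  match cs with
  | '0' :: 'b' :: rest => rest
  | cs => cs

def pvParseBin (cs : List Char) : Int :=
  cs.foldl (fun a c => 2 * a + (if c = '1' then 1 else 0)) 0

def find_minimal_path_alt (target : Int) : List String :=
  if target = 0 then []
  else
    let bits := pvRemovePrefix0b (pvBin target)   -- bin(target).removeprefix('0b')
    (PySem.List.pyRange ((bits.length : Nat) : Int) 0 (-1)).map (fun f =>
      let s := PySem.List.slice bits (some 1) (some f)          -- bits[1:f]
      PySem.Int.toStr f ++ pvPad18 (pvParseBin (if s = [] then ['0'] else s) + 1))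

-- ===== PRECONDITION & SPEC =====
-- Pre_ excludes negative targets: they lie outside the problem's room-number domain, and there A returns
-- entries with a '-' sign embedded inside the zero padding while B's binary-string parse yields other values.
def Pre_find_minimal_path (target : Int) : Prop := 0 ≤ target
instance (target : Int) : Decidable (Pre_find_minimal_path target) := by unfold Pre_find_minimal_path; infer_instance
def pvWitness_find_minimal_path : Int := (5)

def Spec_find_minimal_path (target : Int) (out : List String) : Prop := out = find_minimal_path_alt target
instance (target : Int) (out : List String) : Decidable (Spec_find_minimal_path target out) := by unfold Spec_find_minimal_path; infer_instance

-- ===== CLAIM (what is proved, stated in full; the proofs are below) =====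
def Claim_equal_find_minimal_path : Prop := ∀ (target : Int), Dom_find_minimal_path target → Pre_find_minimal_path target → Spec_find_minimal_path target (find_minimal_path target)

-- ===== LEMMAS AND PROOFS =====

theorem pv_floordiv_floordiv (a : Int) (k : Nat) :
    PySem.Int.floordiv (PySem.Int.floordiv a 2) (2 ^ k) = PySem.Int.floordiv a (2 ^ (k + 1)) := by
  simp only [PySem.Int.floordiv]
  rw [Int.fdiv_fdiv_eq_fdiv_mul a (by norm_num) (by positivity)]
  ring_nf

-- A's loop, closed: the entries for floors L..1 with rooms target >> (L-f)
theorem pvLoopA_eq (n : Nat) (fl room : Int) (path : List String) (h : fl = (n : Int)) :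
    pvLoopA fl room path =
      path ++ (PySem.List.pyRange fl 0 (-1)).map
        (fun f => PySem.Int.toStr f ++
          pvPad18 (PySem.Int.floordiv room (2 ^ (fl - f).toNat) - 2 ^ (f - 1).toNat + 1)) := by
  induction n generalizing fl room path with
  | zero =>
    subst h
    rw [pvLoopA, PySem.List.pyRange_neg_one_eq_nil (by omega)]
    simp
  | succ n ih =>
    subst h
    rw [pvLoopA]
    simp only [show (0 : Int) < ((n + 1 : Nat) : Int) by exact_mod_cast Nat.succ_pos n, if_pos]
    rw [ih (((n + 1 : Nat) : Int) - 1) (PySem.Int.floordiv room 2) _ (by push_cast; ring)]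
    rw [PySem.List.pyRange_neg_one_cons (a := ((n + 1 : Nat) : Int)) (b := 0) (by exact_mod_cast Nat.succ_pos n)]
    rw [List.map_cons, List.append_assoc, List.singleton_append]
    have hhead : PySem.Int.floordiv room (2 ^ (((n + 1 : Nat) : Int) - ((n + 1 : Nat) : Int)).toNat) = room := by
      norm_num [PySem.Int.floordiv, Int.fdiv_one]
    have htail : (PySem.List.pyRange (((n + 1 : Nat) : Int) - 1) 0 (-1)).map
        (fun f => PySem.Int.toStr f ++
          pvPad18 (PySem.Int.floordiv (PySem.Int.floordiv room 2)
            (2 ^ ((((n + 1 : Nat) : Int) - 1) - f).toNat) - 2 ^ (f - 1).toNat + 1)) =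
        (PySem.List.pyRange (((n + 1 : Nat) : Int) - 1) 0 (-1)).map
        (fun f => PySem.Int.toStr f ++
          pvPad18 (PySem.Int.floordiv room (2 ^ (((n + 1 : Nat) : Int) - f).toNat) - 2 ^ (f - 1).toNat + 1)) := by
      apply List.map_congr_left
      intro f hf
      rw [PySem.List.mem_pyRange_neg_one] at hf
      have hk : ((((n + 1 : Nat) : Int) - 1) - f).toNat + 1 = (((n + 1 : Nat) : Int) - f).toNat := by omega
      rw [pv_floordiv_floordiv, hk]
    rw [htail, hhead]

theorem pvBinChars_length (m : Nat) : (pvBinChars m).length = PySem.Int.bitLength (m : Int) := by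
  induction m using Nat.strong_induction_on with
  | _ m ih =>
    rw [pvBinChars]
    by_cases h : m = 0
    · simp [h, PySem.Int.bitLength_zero]
    · rw [dif_neg h, List.length_append, ih (m / 2) (Nat.div_lt_self (Nat.pos_of_ne_zero h) (by omega)),
        PySem.Int.bitLength_natCast (Nat.pos_of_ne_zero h)]
      simp

theorem pvParseBin_shift (cs : List Char) (a : Int) :
    cs.foldl (fun a c => 2 * a + (if c = '1' then 1 else 0)) a =
      a * 2 ^ cs.length + pvParseBin cs := by
  induction cs generalizing a with
  | nil => simp [pvParseBin]
  | cons c cs ih =>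
    simp only [List.foldl_cons, List.length_cons, pvParseBin] at *
    rw [ih, ih (2 * 0 + _)]
    ring

theorem pvParseBin_append (cs : List Char) (c : Char) :
    pvParseBin (cs ++ [c]) = 2 * pvParseBin cs + (if c = '1' then 1 else 0) := by
  simp only [pvParseBin, List.foldl_append, List.foldl_cons, List.foldl_nil]

theorem pvParseBin_binChars (m : Nat) : pvParseBin (pvBinChars m) = (m : Int) := by
  induction m using Nat.strong_induction_on with
  | _ m ih =>
    rw [pvBinChars]
    by_cases h : m = 0
    · simp [h, pvParseBin]
    · rw [dif_neg h, pvParseBin_append, ih (m / 2) (Nat.div_lt_self (Nat.pos_of_ne_zero h) (by omega))]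
      have := Nat.div_add_mod m 2
      by_cases hm : m % 2 = 1
      · rw [if_pos hm, if_pos rfl]; push_cast; omega
      · rw [if_neg hm, if_neg (by decide : ¬('0' = '1'))]; push_cast; omega

theorem pvBinChars_head (m : Nat) (hm : 0 < m) : ∃ rest, pvBinChars m = '1' :: rest := by
  induction m using Nat.strong_induction_on with
  | _ m ih =>
    rw [pvBinChars, dif_neg (by omega : ¬ m = 0)]
    by_cases h : m / 2 = 0
    · have h1 : m = 1 := by omega
      subst h1
      exact ⟨[], by simp [pvBinChars]⟩
    · obtain ⟨rest, hr⟩ := ih (m / 2) (Nat.div_lt_self hm (by omega)) (Nat.pos_of_ne_zero h)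
      exact ⟨rest ++ [if m % 2 = 1 then '1' else '0'], by rw [hr]; simp⟩

theorem pvBinChars_take (m k : Nat) (h : 0 < m / 2 ^ k) :
    (pvBinChars m).take ((pvBinChars m).length - k) = pvBinChars (m / 2 ^ k) := by
  induction k with
  | zero => simp
  | succ k ih =>
    have hq : m / 2 ^ (k + 1) = m / 2 ^ k / 2 := by
      rw [pow_succ, Nat.div_div_eq_div_mul]
    rw [hq] at h
    have hqpos : 0 < m / 2 ^ k := lt_of_lt_of_le h (Nat.div_le_self _ _)
    have ihh := ih hqpos
    have hqe : pvBinChars (m / 2 ^ k) =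
        pvBinChars (m / 2 ^ k / 2) ++ [if m / 2 ^ k % 2 = 1 then '1' else '0'] := by
      rw [pvBinChars, dif_neg (by omega)]
    have hlen : (pvBinChars (m / 2 ^ k)).length = (pvBinChars m).length - k := by
      rw [← ihh, List.length_take]; omega
    have hlen2 : (pvBinChars (m / 2 ^ k / 2)).length = (pvBinChars m).length - (k + 1) := by
      have := congrArg List.length hqe
      simp only [List.length_append, List.length_cons, List.length_nil] at this
      have hpos : 0 < (pvBinChars m).length - k := by
        rw [← hlen, hqe]; simp
      omega
    have h1 : (pvBinChars m).take ((pvBinChars m).length - (k + 1)) =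
        ((pvBinChars m).take ((pvBinChars m).length - k)).take ((pvBinChars m).length - (k + 1)) := by
      rw [List.take_take, Nat.min_eq_left (by omega)]
    rw [hq, h1, ihh, hqe, ← hlen2, List.take_left]

theorem pvParseBin_if (s : List Char) :
    pvParseBin (if s = [] then ['0'] else s) = pvParseBin s := by
  split
  · simp_all [pvParseBin]
  · rfl

theorem pv_fdiv_natCast (m k : Nat) :
    PySem.Int.floordiv (m : Int) ((2 : Int) ^ k) = ((m / 2 ^ k : Nat) : Int) := by
  simp only [PySem.Int.floordiv]
  rw [Int.fdiv_eq_ediv]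
  simp

-- B's value at floor fn equals A's room arithmetic, for 1 ≤ fn ≤ bitLength m, m > 0
theorem pv_entry_value (m fn : Nat) (hm : 0 < m) (hf1 : 1 ≤ fn)
    (hfL : fn ≤ PySem.Int.bitLength (m : Int)) :
    pvParseBin (((pvBinChars m).drop 1).take (fn - 1)) =
      ((m / 2 ^ (PySem.Int.bitLength (m : Int) - fn) : Nat) : Int) - 2 ^ (fn - 1) := by
  set L := PySem.Int.bitLength (m : Int) with hL
  set k := L - fn with hk
  have hple : 2 ^ (L - 1) ≤ m := by
    have := PySem.Int.two_pow_bitLength_le (m : Int) (by exact_mod_cast hm.ne')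
    simpa using this
  have hqpos : 2 ^ (fn - 1) ≤ m / 2 ^ k := by
    rw [Nat.le_div_iff_mul_le (by positivity)]
    calc 2 ^ (fn - 1) * 2 ^ k = 2 ^ (fn - 1 + k) := by rw [pow_add]
    _ ≤ m := by rw [show fn - 1 + k = L - 1 by omega]; exact hple
  have hq0 : 0 < m / 2 ^ k := lt_of_lt_of_le (by positivity) hqpos
  have htake : (pvBinChars m).take fn = pvBinChars (m / 2 ^ k) := by
    have := pvBinChars_take m k hq0
    rwa [pvBinChars_length, show (PySem.Int.bitLength (m : Int)) - k = fn by omega] at this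
  obtain ⟨rest, hr⟩ := pvBinChars_head (m / 2 ^ k) hq0
  have hrlen : rest.length = fn - 1 := by
    have h1 : (pvBinChars (m / 2 ^ k)).length = fn := by
      rw [← htake, List.length_take, pvBinChars_length, Nat.min_eq_left hfL]
    rw [hr] at h1; simp only [List.length_cons] at h1; omega
  have hvq : pvParseBin (pvBinChars (m / 2 ^ k)) = ((m / 2 ^ k : Nat) : Int) :=
    pvParseBin_binChars _
  rw [hr] at hvq
  have hsplit : pvParseBin ('1' :: rest) = 2 ^ rest.length + pvParseBin rest := by
    have h1 : pvParseBin ('1' :: rest) =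
        List.foldl (fun a c => 2 * a + (if c = '1' then 1 else 0)) 1 rest := by
      simp [pvParseBin]
    rw [h1, pvParseBin_shift rest 1]
    ring
  have hdrop : ((pvBinChars m).drop 1).take (fn - 1) = rest := by
    rw [← List.drop_take, htake, hr]
    simp
  rw [hdrop]
  rw [hsplit, hrlen] at hvq
  omega

theorem find_minimal_path_spec : Claim_equal_find_minimal_path := by
  intro target _ hpre
  unfold Spec_find_minimal_path find_minimal_path find_minimal_path_alt
  by_cases h0 : target = 0
  · subst h0
    rw [if_pos rfl, pvLoopA]
    simp [PySem.Int.bitLength_zero]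
  · rw [if_neg h0]
    have hm : target = ((target.toNat : Nat) : Int) := (Int.toNat_of_nonneg hpre).symm
    set m := target.toNat with hmdef
    have hm0 : 0 < m := by omega
    have hbin : pvBin target = ['0', 'b'] ++ pvBinChars m := by
      rw [pvBin, if_neg (not_lt.mpr hpre), if_neg h0, show target.natAbs = m from by omega]
    have hbits : pvRemovePrefix0b (pvBin target) = pvBinChars m := by
      rw [hbin]
      rfl
    simp only [hbits]
    have hL : ((pvBinChars m).length : Int) = ((PySem.Int.bitLength target : Nat) : Int) := by
      rw [pvBinChars_length, hm]
    rw [hL, pvLoopA_eq (PySem.Int.bitLength target) _ target [] rfl, List.nil_append]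
    apply List.map_congr_left
    intro f hf
    rw [PySem.List.mem_pyRange_neg_one] at hf
    set L := PySem.Int.bitLength target with hLdef
    have hfn : f = ((f.toNat : Nat) : Int) := (Int.toNat_of_nonneg (by omega)).symm
    set fn := f.toNat with hfndef
    have hf1 : 1 ≤ fn := by omega
    have hfL : fn ≤ L := by omega
    have hLm : L = PySem.Int.bitLength (m : Int) := by rw [hLdef, hm]
    congr 1
    have hslice : PySem.List.slice (pvBinChars m) (some 1) (some f) =
        ((pvBinChars m).drop 1).take (fn - 1) := by
      rw [PySem.List.slice_toNat _ (by norm_num) (by omega)]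
      norm_num
      rfl
    rw [hslice, pvParseBin_if, pv_entry_value m fn hm0 hf1 (hLm ▸ hfL)]
    have hkk : (((L : Nat) : Int) - f).toNat = L - fn := by omega
    have hff : (f - 1).toNat = fn - 1 := by omega
    rw [hm, pv_fdiv_natCast, hkk, hff, ← hLm]
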